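-- pv_equiv track=rewrite | github.com/AshishSalaskar1/CSES-Solver-CLI | generators/reference_solutions/counting.py | _solve_1080
-- ===== SOURCE A (Python) =====
-- MOD = 10**9 + 7
--
-- def _solve_1080(input_data: str) -> str:
--     s = input_data.strip()
--     n = len(s)
--     if n % 2 == 1:
--         return "0"
--     # Interval DP: dp[i][j] = number of ways to empty s[i..j]
--     # Base: dp[i][i-1] = 1 (empty interval)
--     # dp[i][j] = sum over k where s[i]==s[k] and k-i is odd:
--     #            dp[i+1][k-1] * dp[k+1][j] * C(half_len - 1, (k-i-1)//2)
--     # where half_len = (j - i + 1) // 2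
--
--     # Precompute factorials and inverse factorials
--     fact = [1] * (n + 1)
--     for i in range(1, n + 1):
--         fact[i] = fact[i - 1] * i % MOD
--     inv_fact = [1] * (n + 1)
--     inv_fact[n] = pow(fact[n], MOD - 2, MOD)
--     for i in range(n - 1, -1, -1):
--         inv_fact[i] = inv_fact[i + 1] * (i + 1) % MOD
--
--     def comb(a, b):
--         if b < 0 or b > a:
--             return 0
--         return fact[a] * inv_fact[b] % MOD * inv_fact[a - b] % MOD
--
--     dp = [[0] * n for _ in range(n)]
--     # Base cases: dp[i][i-1] = 1 (empty), handled by checking i > j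
--     for length in range(0, n + 1, 2):
--         if length == 0:
--             continue
--         for i in range(n - length + 1):
--             j = i + length - 1
--             half = length // 2
--             # s[i] must be matched with some s[k] where k > i and (k - i) is odd
--             for k in range(i + 1, j + 1, 2):
--                 if s[k] != s[i]:
--                     continue
--                 left = dp[i + 1][k - 1] if k > i + 1 else 1
--                 right = dp[k + 1][j] if k < j else 1
--                 left_half = (k - i - 1) // 2
--                 ways = left * right % MOD * comb(half - 1, left_half) % MOD
--                 dp[i][j] = (dp[i][j] + ways) % MOD
--
--     return str(dp[0][n - 1])
-- ===== SOURCE B (Python) =====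
-- MOD = 10**9 + 7
--
-- def _solve_1080(input_data: str) -> str:
--     s = input_data.strip()
--     n = len(s)
--     if n % 2 == 1:
--         return "0"
--     # same factorial/inverse-factorial precompute as the reference
--     fact = [1] * (n + 1)
--     for i in range(1, n + 1):
--         fact[i] = fact[i - 1] * i % MOD
--     inv_fact = [1] * (n + 1)
--     inv_fact[n] = pow(fact[n], MOD - 2, MOD)
--     for i in range(n - 1, -1, -1):
--         inv_fact[i] = inv_fact[i + 1] * (i + 1) % MOD
--
--     def comb(a, b):
--         if b < 0 or b > a:
--             return 0
--         return fact[a] * inv_fact[b] % MOD * inv_fact[a - b] % MOD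
--
--     # Top-down memoized recursion over intervals instead of a bottom-up table.
--     memo = {}
--
--     def solve(i, j):
--         if i > j:
--             return 1
--         key = (i, j)
--         if key in memo:
--             return memo[key]
--         half = (j - i + 1) // 2
--         total = 0
--         for k in range(i + 1, j + 1, 2):
--             if s[k] == s[i]:
--                 total = (total + solve(i + 1, k - 1) * solve(k + 1, j) % MOD
--                          * comb(half - 1, (k - i - 1) // 2)) % MOD
--         memo[key] = total
--         return total
--
--     return str(solve(0, n - 1))
-- ===== Notes on version B (the rewrite author's own statement) =====
-- stated objective: alternative
-- what changed: Replaced the bottom-up interval-DP table filled by three nested loops over lengths/starts/match positions with a top-down memoized recursion solve(i,j) over the same recurrence (same factorial/comb precompute), which only visits reachable intervals.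
-- crash fix: On inputs that strip to the empty string A raises IndexError (dp[0][-1] on an empty table); B's recursion naturally returns "1" (one way to empty the empty string). — e.g. on _solve_1080(""): A raises IndexError, B returns "1"
import Mathlib
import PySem

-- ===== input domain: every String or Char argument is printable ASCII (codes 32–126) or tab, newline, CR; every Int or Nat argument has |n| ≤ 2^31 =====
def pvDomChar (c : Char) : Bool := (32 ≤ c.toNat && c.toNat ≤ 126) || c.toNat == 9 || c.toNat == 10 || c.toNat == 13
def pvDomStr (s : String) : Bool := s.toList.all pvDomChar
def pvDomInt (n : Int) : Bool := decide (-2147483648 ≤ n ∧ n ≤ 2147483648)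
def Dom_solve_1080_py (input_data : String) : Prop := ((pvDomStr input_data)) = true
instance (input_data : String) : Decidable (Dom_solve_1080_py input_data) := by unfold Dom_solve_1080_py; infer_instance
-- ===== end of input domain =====

-- B replaces A's bottom-up interval-DP table (three nested loops) with a top-down memoized
-- recursion over the same recurrence; same factorial/comb precompute; objective: alternative.

-- ===== PORT A =====
-- helpers shared by BOTH ports: both Pythons contain this identical factorial / inverse-factorial
-- / comb precompute (and pow(x, MOD-2, MOD)), so it is defined once.
def pvM : Int := 1000000007

-- port of Python's built-in pow(b, e, MOD) (binary exponentiation, b ≥ 0)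
def pvPowMod (b : Int) (e : Nat) : Int :=
  if h : e = 0 then 1
  else
    let hh := pvPowMod (b * b % pvM) (e / 2)
    if e % 2 = 1 then hh * b % pvM else hh
termination_by e
decreasing_by exact Nat.div_lt_self (Nat.pos_of_ne_zero h) (by norm_num)


-- fact = [1]*(n+1); for i in range(1, n+1): fact[i] = fact[i-1]*i % MOD (built by appending)
def pvFactList (nn : Nat) : List Int :=
  (List.range nn).foldl (fun l i => l ++ [l.getD i 1 * ((i : Int) + 1) % pvM]) [1]

-- inv_fact[nn] = pow(fact[nn], MOD-2, MOD); for i in range(n-1, -1, -1):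
-- inv_fact[i] = inv_fact[i+1]*(i+1) % MOD (built downwards by prepending)
def pvInvFactList (nn : Nat) : List Int :=
  (List.range nn).foldl (fun l j => (l.headD 1 * ((nn - j : Nat) : Int) % pvM) :: l)
    [pvPowMod ((pvFactList nn).getD nn 1) 1000000005]

-- A's mutable 2-D table dp = [[0]*n for _ in range(n)], with Python's read / write
def pvGet (dp : List (List Int)) (a b : Nat) : Int := (dp.getD a []).getD b 0

def pvSet (dp : List (List Int)) (a b : Nat) (v : Int) : List (List Int) :=
  dp.set a ((dp.getD a []).set b v)

-- body of A's innermost loop: for k in range(i+1, j+1, 2) with k = i+1+2*t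
def pvStepK (cs : List Char) (cmb : Nat → Nat → Int) (i j half : Nat) (dp : List (List Int))
    (t : Nat) : List (List Int) :=
  let k := i + 1 + 2 * t
  if cs.getD k ' ' ≠ cs.getD i ' ' then dp
  else
    let left := if i + 1 < k then pvGet dp (i + 1) (k - 1) else 1
    let right := if k < j then pvGet dp (k + 1) j else 1
    let ways := left * right % pvM * cmb (half - 1) ((k - i - 1) / 2) % pvM
    pvSet dp i j ((pvGet dp i j + ways) % pvM)

-- body of A's middle loop: for i in range(n - length + 1), j = i+length-1, half = length//2
def pvStepI (cs : List Char) (cmb : Nat → Nat → Int) (L : Nat) (dp : List (List Int))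
    (i : Nat) : List (List Int) :=
  (List.range (L / 2)).foldl (pvStepK cs cmb i (i + L - 1) (L / 2)) dp

-- body of A's outer loop: for length in range(0, n+1, 2) (length = 2*li; continue at 0)
def pvStepL (cs : List Char) (cmb : Nat → Nat → Int) (n : Nat) (dp : List (List Int))
    (li : Nat) : List (List Int) :=
  if 2 * li = 0 then dp
  else (List.range (n - 2 * li + 1)).foldl (pvStepI cs cmb (2 * li)) dp

def solve_1080_py (input_data : String) : String :=
  let cs := (PySem.Str.strip input_data).toList
  let n := cs.length
  if n % 2 = 1 then "0"
  else
    let fact := pvFactList n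
    let inv_fact := pvInvFactList n
    let comb := fun (a b : Nat) =>
      if a < b then (0 : Int)
      else fact.getD a 1 * inv_fact.getD b 1 % pvM * inv_fact.getD (a - b) 1 % pvM
    let dp0 := List.replicate n (List.replicate n (0 : Int))
    let dpF := (List.range (n / 2 + 1)).foldl (pvStepL cs comb n) dp0
    PySem.Int.toStr (pvGet dpF 0 (n - 1))

-- ===== PORT B =====
-- top-down memoized recursion solve(i, j); ported half-open as (i, e) with e = j+1 so the
-- indices stay Nat; the fuel argument only makes the recursion structural (the port calls it
-- with fuel ≥ e - i, so the fuel-0 branch is never reached) — it is not an algorithm switch.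
def solveMemo (cs : List Char) (cmb : Nat → Nat → Int) (fuel i e : Nat) (memo : PySem.Dict (Nat × Nat) Int) :
    Int × PySem.Dict (Nat × Nat) Int :=
  if e ≤ i then (1, memo)
  else
    match memo.get? (i, e) with
    | some v => (v, memo)
    | none =>
      match fuel with
      | 0 => (0, memo)
      | fuel' + 1 =>
        let half := (e - i) / 2
        let p := (List.range half).foldl
          (fun (p : Int × PySem.Dict (Nat × Nat) Int) t =>
            let k := i + 1 + 2 * t
            if cs.getD k ' ' = cs.getD i ' ' then
              let l := solveMemo cs cmb fuel' (i + 1) k p.2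
              let r := solveMemo cs cmb fuel' (k + 1) e l.2
              ((p.1 + l.1 * r.1 % pvM * cmb (half - 1) ((k - i - 1) / 2)) % pvM, r.2)
            else p)
          ((0 : Int), memo)
        (p.1, p.2.insert (i, e) p.1)

def solve_1080_py_alt (input_data : String) : String :=
  let cs := (PySem.Str.strip input_data).toList
  let n := cs.length
  if n % 2 = 1 then "0"
  else
    let fact := pvFactList n
    let inv_fact := pvInvFactList n
    let comb := fun (a b : Nat) =>
      if a < b then (0 : Int)
      else fact.getD a 1 * inv_fact.getD b 1 % pvM * inv_fact.getD (a - b) 1 % pvM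
    PySem.Int.toStr (solveMemo cs comb (n + 1) 0 n PySem.Dict.empty).1

-- ===== PRECONDITION & SPEC =====
-- Pre_ excludes exactly the inputs that strip to the empty string: there Python A raises
-- IndexError (dp[0][-1] on an empty table) and returns no value.
def Pre_solve_1080_py (input_data : String) : Prop :=
  (PySem.Str.strip input_data).toList ≠ []
instance (input_data : String) : Decidable (Pre_solve_1080_py input_data) := by
  unfold Pre_solve_1080_py; infer_instance

def pvWitness_solve_1080_py : String := "ab"

-- On inputs that strip to the empty string A raises IndexError; B's recursion naturally
-- returns "1" (one way to empty the empty string).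
def Raises_solve_1080_py (input_data : String) : Prop :=
  (PySem.Str.strip input_data).toList = []
instance (input_data : String) : Decidable (Raises_solve_1080_py input_data) := by
  unfold Raises_solve_1080_py; infer_instance
def pvRaiseWitness_solve_1080_py : String := ""
def pvRaiseWitnessOut_solve_1080_py : String := "1"

def Spec_solve_1080_py (input_data : String) (out : String) : Prop :=
  out = solve_1080_py_alt input_data
instance (input_data : String) (out : String) : Decidable (Spec_solve_1080_py input_data out) := by
  unfold Spec_solve_1080_py; infer_instance

-- ===== CLAIM (what is proved, stated in full; the proofs are below) =====
def Claim_equal_solve_1080_py : Prop :=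
  ∀ (input_data : String), Dom_solve_1080_py input_data → Pre_solve_1080_py input_data →
    Spec_solve_1080_py input_data (solve_1080_py input_data)

def Claim_raises_solve_1080_py : Prop :=
  (∀ (input_data : String), Dom_solve_1080_py input_data → Raises_solve_1080_py input_data →
      ¬ Pre_solve_1080_py input_data) ∧
  (Dom_solve_1080_py (pvRaiseWitness_solve_1080_py) ∧
    Raises_solve_1080_py (pvRaiseWitness_solve_1080_py) ∧
    solve_1080_py_alt (pvRaiseWitness_solve_1080_py) = pvRaiseWitnessOut_solve_1080_py)

-- ===== LEMMAS AND PROOFS =====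

-- the common mathematical value: number of ways (mod pvM) to empty cs[i..e-1]
def pvG (cs : List Char) (cmb : Nat → Nat → Int) (i e : Nat) : Int :=
  if e ≤ i then 1
  else
    (List.range ((e - i) / 2)).attach.foldl
      (fun (acc : Int) t =>
        let k := i + 1 + 2 * t.1
        if cs.getD k ' ' ≠ cs.getD i ' ' then acc
        else (acc + pvG cs cmb (i + 1) k * pvG cs cmb (k + 1) e % pvM
                * cmb ((e - i) / 2 - 1) ((k - i - 1) / 2) % pvM) % pvM)
      0
termination_by e - i
decreasing_by
  · have := t.2; simp only [List.mem_range] at this; omega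
  · have := t.2; simp only [List.mem_range] at this; omega

def pvStepG (cs : List Char) (cmb : Nat → Nat → Int) (i e : Nat) (acc : Int) (t : Nat) : Int :=
  let k := i + 1 + 2 * t
  if cs.getD k ' ' ≠ cs.getD i ' ' then acc
  else (acc + pvG cs cmb (i + 1) k * pvG cs cmb (k + 1) e % pvM
          * cmb ((e - i) / 2 - 1) ((k - i - 1) / 2) % pvM) % pvM

lemma pvG_base (cs : List Char) (cmb : Nat → Nat → Int) (i e : Nat) (h : e ≤ i) : pvG cs cmb i e = 1 := by
  rw [pvG]; simp [h]

lemma pvG_step (cs : List Char) (cmb : Nat → Nat → Int) (i e : Nat) (h : ¬ e ≤ i) :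
    pvG cs cmb i e = (List.range ((e - i) / 2)).foldl (pvStepG cs cmb i e) 0 := by
  rw [pvG]
  simp only [if_neg h]
  exact List.foldl_attach (f := pvStepG cs cmb i e)

-- ----- A side -----

def pvDone (n L I a b : Nat) : Prop :=
  a ≤ b ∧ b < n ∧ (b + 1 - a) % 2 = 0 ∧ (b + 1 - a < L ∨ (b + 1 - a = L ∧ a < I))

def pvShape (dp : List (List Int)) (n : Nat) : Prop :=
  dp.length = n ∧ ∀ r ∈ dp, r.length = n

def pvInvA (cs : List Char) (cmb : Nat → Nat → Int) (L I : Nat) (dp : Nat → Nat → Int) : Prop :=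
  ∀ a b, (pvDone cs.length L I a b → dp a b = pvG cs cmb a (b + 1)) ∧
    (¬ pvDone cs.length L I a b → dp a b = 0)

def pvInvAL (cs : List Char) (cmb : Nat → Nat → Int) (L I : Nat) (dp : List (List Int)) : Prop :=
  pvShape dp cs.length ∧ pvInvA cs cmb L I (fun a b => pvGet dp a b)

lemma shape_set (dp : List (List Int)) (n a b : Nat) (v : Int) (hs : pvShape dp n) :
    pvShape (pvSet dp a b v) n := by
  obtain ⟨h1, h2⟩ := hs
  by_cases ha : a < dp.length
  · refine ⟨by simp [pvSet, h1], ?_⟩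
    intro r hr
    rcases List.mem_or_eq_of_mem_set hr with h | h
    · exact h2 r h
    · subst h
      rw [List.length_set]
      exact h2 _ (List.getD_eq_getElem dp [] ha ▸ List.getElem_mem ha)
  · unfold pvSet
    rw [List.set_eq_of_length_le (by omega)]
    exact ⟨h1, h2⟩

lemma get_set (dp : List (List Int)) (n a b a' b' : Nat) (v : Int) (hs : pvShape dp n)
    (ha : a < n) (hb : b < n) :
    pvGet (pvSet dp a b v) a' b' = if a' = a ∧ b' = b then v else pvGet dp a' b' := by
  obtain ⟨h1, h2⟩ := hs
  have ha' : a < dp.length := by omega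
  have hrow : (dp[a]?.getD []).length = n := by
    rw [← List.getD_eq_getElem?_getD]
    exact h2 _ (List.getD_eq_getElem dp [] ha' ▸ List.getElem_mem ha')
  unfold pvGet pvSet
  simp only [List.getD_eq_getElem?_getD]
  by_cases haa : a' = a
  · subst haa
    rw [List.getElem?_set_self ha', Option.getD_some]
    by_cases hbb : b' = b
    · subst hbb
      rw [if_pos ⟨rfl, rfl⟩, List.getElem?_set_self (by omega), Option.getD_some]
    · rw [if_neg (by omega), List.getElem?_set_ne (show b ≠ b' by omega)]
  · rw [if_neg (by omega), List.getElem?_set_ne (show a ≠ a' by omega)]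

lemma get_replicate_zero (n a b : Nat) :
    pvGet (List.replicate n (List.replicate n (0 : Int))) a b = 0 := by
  unfold pvGet
  simp only [List.getD_eq_getElem?_getD, List.getElem?_replicate]
  by_cases ha : a < n
  · simp only [if_pos ha, Option.getD_some]
    by_cases hb : b < n
    · simp [if_pos hb]
    · simp [if_neg hb]
  · simp [if_neg ha]

lemma innerA (cs : List Char) (cmb : Nat → Nat → Int) (L i : Nat) (dp : Nat → Nat → Int)
    (hInv : pvInvA cs cmb L i dp) (hL2 : 2 ≤ L) (hLe : L % 2 = 0) (hin : i + L ≤ cs.length) :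
    ∀ ts : List Nat, (∀ t ∈ ts, t < L / 2) →
      ∀ (dpl : List (List Int)) (acc : Int),
      pvShape dpl cs.length →
      (∀ a b, ¬ (a = i ∧ b = i + L - 1) → pvGet dpl a b = dp a b) →
      pvGet dpl i (i + L - 1) = acc →
      pvShape (ts.foldl (pvStepK cs cmb i (i + L - 1) (L / 2)) dpl) cs.length ∧
      (∀ a b, ¬ (a = i ∧ b = i + L - 1) →
        pvGet (ts.foldl (pvStepK cs cmb i (i + L - 1) (L / 2)) dpl) a b = dp a b) ∧
      pvGet (ts.foldl (pvStepK cs cmb i (i + L - 1) (L / 2)) dpl) i (i + L - 1)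
        = ts.foldl (pvStepG cs cmb i (i + L)) acc := by
  intro ts
  induction ts with
  | nil => intro _ dpl acc hs hpt hctr; exact ⟨hs, hpt, hctr⟩
  | cons t ts ih =>
    intro hts dpl acc hs hpt hctr
    have ht : t < L / 2 := hts t (List.mem_cons_self ..)
    have hts' : ∀ u ∈ ts, u < L / 2 := fun u hu => hts u (List.mem_cons_of_mem _ hu)
    simp only [List.foldl_cons]
    by_cases hc : cs.getD (i + 1 + 2 * t) ' ' ≠ cs.getD i ' '
    · have hK : pvStepK cs cmb i (i + L - 1) (L / 2) dpl t = dpl := by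
        unfold pvStepK; simp only [if_pos hc]
      have hG : pvStepG cs cmb i (i + L) acc t = acc := by
        unfold pvStepG; simp only [if_pos hc]
      rw [hK, hG]
      exact ih hts' dpl acc hs hpt hctr
    · have hleft : (if i + 1 < i + 1 + 2 * t then pvGet dpl (i + 1) (i + 1 + 2 * t - 1) else 1)
          = pvG cs cmb (i + 1) (i + 1 + 2 * t) := by
        by_cases hk : i + 1 < i + 1 + 2 * t
        · rw [if_pos hk, hpt _ _ (by omega)]
          have hd : pvDone cs.length L i (i + 1) (i + 1 + 2 * t - 1) := by
            unfold pvDone; omega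
          have harith : i + 1 + 2 * t - 1 + 1 = i + 1 + 2 * t := by omega
          rw [(hInv (i + 1) (i + 1 + 2 * t - 1)).1 hd, harith]
        · rw [if_neg hk, pvG_base cs cmb (i + 1) (i + 1 + 2 * t) (by omega)]
      have hright : (if i + 1 + 2 * t < i + L - 1 then pvGet dpl (i + 1 + 2 * t + 1) (i + L - 1) else 1)
          = pvG cs cmb (i + 1 + 2 * t + 1) (i + L) := by
        by_cases hk : i + 1 + 2 * t < i + L - 1
        · rw [if_pos hk, hpt _ _ (by omega)]
          have hd : pvDone cs.length L i (i + 1 + 2 * t + 1) (i + L - 1) := by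
            unfold pvDone; omega
          have harith : i + L - 1 + 1 = i + L := by omega
          rw [(hInv (i + 1 + 2 * t + 1) (i + L - 1)).1 hd, harith]
        · rw [if_neg hk, pvG_base cs cmb (i + 1 + 2 * t + 1) (i + L) (by omega)]
      have hK : pvStepK cs cmb i (i + L - 1) (L / 2) dpl t
          = pvSet dpl i (i + L - 1) (pvStepG cs cmb i (i + L) acc t) := by
        unfold pvStepK
        simp only [if_neg hc]
        rw [hleft, hright, hctr]
        unfold pvStepG
        simp only [if_neg hc]
        have hcomb : (i + L - i) / 2 - 1 = L / 2 - 1 := by omega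
        rw [hcomb]
      rw [hK]
      refine ih hts' _ _ (shape_set dpl cs.length i (i + L - 1) _ hs) ?_ ?_
      · intro a b hab
        rw [get_set dpl cs.length i (i + L - 1) a b _ hs (by omega) (by omega), if_neg hab]
        exact hpt a b hab
      · rw [get_set dpl cs.length i (i + L - 1) i (i + L - 1) _ hs (by omega) (by omega),
          if_pos ⟨rfl, rfl⟩]

lemma stepI_inv (cs : List Char) (cmb : Nat → Nat → Int) (L I : Nat) (dp : List (List Int))
    (hInv : pvInvAL cs cmb L I dp) (hL2 : 2 ≤ L) (hLe : L % 2 = 0) (hin : I + L ≤ cs.length) :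
    pvInvAL cs cmb L (I + 1) (pvStepI cs cmb L dp I) := by
  obtain ⟨hs, hf⟩ := hInv
  have hctr : pvGet dp I (I + L - 1) = 0 :=
    (hf I (I + L - 1)).2 (fun hd => by unfold pvDone at hd; omega)
  have hG : (List.range (L / 2)).foldl (pvStepG cs cmb I (I + L)) 0 = pvG cs cmb I (I + L) := by
    rw [pvG_step cs cmb I (I + L) (by omega)]
    have : I + L - I = L := by omega
    rw [this]
  obtain ⟨hs', hpt', hctr'⟩ := innerA cs cmb L I (fun a b => pvGet dp a b) hf hL2 hLe hin
    (List.range (L / 2)) (fun t htm => List.mem_range.mp htm) dp 0 hs (fun _ _ _ => rfl) hctr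
  rw [hG] at hctr'
  refine ⟨hs', fun a b => ⟨?_, ?_⟩⟩
  · intro hd
    show pvGet ((List.range (L / 2)).foldl (pvStepK cs cmb I (I + L - 1) (L / 2)) dp) a b
      = pvG cs cmb a (b + 1)
    by_cases hab : a = I ∧ b = I + L - 1
    · rw [hab.1, hab.2, hctr']
      congr 1
      omega
    · rw [hpt' a b hab]
      have hiff : pvDone cs.length L (I + 1) a b ↔ pvDone cs.length L I a b := by
        unfold pvDone; omega
      exact (hf a b).1 (hiff.mp hd)
  · intro hnd
    show pvGet ((List.range (L / 2)).foldl (pvStepK cs cmb I (I + L - 1) (L / 2)) dp) a b = 0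
    by_cases hab : a = I ∧ b = I + L - 1
    · exfalso
      apply hnd
      rw [hab.1, hab.2]
      unfold pvDone
      omega
    · rw [hpt' a b hab]
      have hiff : pvDone cs.length L (I + 1) a b ↔ pvDone cs.length L I a b := by
        unfold pvDone; omega
      exact (hf a b).2 (fun hd' => hnd (hiff.mpr hd'))

lemma loopI_inv (cs : List Char) (cmb : Nat → Nat → Int) (L : Nat) (hL2 : 2 ≤ L) (hLe : L % 2 = 0)
    (hLn : L ≤ cs.length) :
    ∀ m, m ≤ cs.length - L + 1 → ∀ dp, pvInvAL cs cmb L 0 dp →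
      pvInvAL cs cmb L m ((List.range m).foldl (pvStepI cs cmb L) dp) := by
  intro m
  induction m with
  | zero => intro _ dp h; simpa using h
  | succ m ih =>
    intro hm dp h
    rw [List.range_succ, List.foldl_append, List.foldl_cons, List.foldl_nil]
    exact stepI_inv cs cmb L m _ (ih (by omega) dp h) hL2 hLe (by omega)

lemma inv_mono (cs : List Char) (cmb : Nat → Nat → Int) (L L' I I' : Nat) (dp : List (List Int))
    (h : pvInvAL cs cmb L I dp)
    (hiff : ∀ a b, pvDone cs.length L' I' a b ↔ pvDone cs.length L I a b) :
    pvInvAL cs cmb L' I' dp := by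
  refine ⟨h.1, fun a b => ?_⟩
  exact ⟨fun hd => (h.2 a b).1 ((hiff a b).1 hd),
    fun hd => (h.2 a b).2 (fun hd' => hd ((hiff a b).2 hd'))⟩

lemma loopL_inv (cs : List Char) (cmb : Nat → Nat → Int) (hev : cs.length % 2 = 0) :
    ∀ m, m ≤ cs.length / 2 + 1 →
      pvInvAL cs cmb (2 * m) 0 ((List.range m).foldl (pvStepL cs cmb cs.length)
        (List.replicate cs.length (List.replicate cs.length (0 : Int)))) := by
  intro m
  induction m with
  | zero =>
    intro _
    simp only [List.range_zero, List.foldl_nil]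
    refine ⟨⟨by simp, fun r hr => by rw [List.eq_of_mem_replicate hr]; simp⟩, fun a b => ⟨?_, ?_⟩⟩
    · intro hd; exact absurd hd (by unfold pvDone; omega)
    · intro _
      exact get_replicate_zero cs.length a b
  | succ m ih =>
    intro hm
    rw [List.range_succ, List.foldl_append, List.foldl_cons, List.foldl_nil]
    have h0 := ih (by omega)
    by_cases hm0 : m = 0
    · subst hm0
      unfold pvStepL
      simp only [Nat.mul_zero, if_pos rfl]
      exact inv_mono cs cmb 0 (2 * 1) 0 0 _ h0 (fun a b => by unfold pvDone; omega)
    · unfold pvStepL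
      rw [if_neg (by omega)]
      have h1 := loopI_inv cs cmb (2 * m) (by omega) (by omega) (by omega)
        (cs.length - 2 * m + 1) le_rfl _ h0
      exact inv_mono cs cmb (2 * m) (2 * (m + 1)) (cs.length - 2 * m + 1) 0 _ h1
        (fun a b => by unfold pvDone; omega)

lemma A_final (cs : List Char) (cmb : Nat → Nat → Int) (hev : cs.length % 2 = 0) (hne : cs ≠ []) :
    pvGet ((List.range (cs.length / 2 + 1)).foldl (pvStepL cs cmb cs.length)
        (List.replicate cs.length (List.replicate cs.length (0 : Int)))) 0 (cs.length - 1)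
      = pvG cs cmb 0 cs.length := by
  have hn : 1 ≤ cs.length := List.length_pos_iff.mpr hne
  have h := loopL_inv cs cmb hev (cs.length / 2 + 1) le_rfl
  have hd : pvDone cs.length (2 * (cs.length / 2 + 1)) 0 0 (cs.length - 1) := by
    unfold pvDone; omega
  have h1 := (h.2 0 (cs.length - 1)).1 hd
  have h2 : pvG cs cmb 0 (cs.length - 1 + 1) = pvG cs cmb 0 cs.length := by
    congr 1
    omega
  exact h1.trans h2

-- ----- B side -----

def pvMemoOK (cs : List Char) (cmb : Nat → Nat → Int) (memo : PySem.Dict (Nat × Nat) Int) : Prop :=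
  ∀ i e v, memo.get? (i, e) = some v → v = pvG cs cmb i e

def pvStepG2 (cs : List Char) (cmb : Nat → Nat → Int) (i e : Nat) (total : Int) (t : Nat) : Int :=
  let k := i + 1 + 2 * t
  if cs.getD k ' ' = cs.getD i ' ' then
    (total + pvG cs cmb (i + 1) k * pvG cs cmb (k + 1) e % pvM
        * cmb ((e - i) / 2 - 1) ((k - i - 1) / 2)) % pvM
  else total

lemma stepG2_eq_stepG (cs : List Char) (cmb : Nat → Nat → Int) (i e : Nat) :
    pvStepG2 cs cmb i e = pvStepG cs cmb i e := by
  funext total t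
  unfold pvStepG2 pvStepG
  by_cases h : cs.getD (i + 1 + 2 * t) ' ' = cs.getD i ' '
  · simp only [h, if_pos, ite_not, if_pos rfl]
    conv_rhs => rw [Int.add_emod, Int.emod_emod_of_dvd _ dvd_rfl, ← Int.add_emod]
  · simp [h]

lemma memoOK_insert (cs : List Char) (cmb : Nat → Nat → Int) (memo : PySem.Dict (Nat × Nat) Int) (i e : Nat)
    (hm : pvMemoOK cs cmb memo) (hv : v = pvG cs cmb i e) :
    pvMemoOK cs cmb (memo.insert (i, e) v) := by
  intro i' e' w hw
  rw [PySem.Dict.get?_insert] at hw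
  split_ifs at hw with h
  · obtain ⟨h1, h2⟩ := Prod.mk.injEq .. ▸ h
    subst h1; subst h2
    cases hw; exact hv
  · exact hm i' e' w hw

lemma innerB (cs : List Char) (cmb : Nat → Nat → Int) (f i e : Nat) (he : i < e) (hf : e - i ≤ f + 1)
    (IH : ∀ i' e' memo, e' - i' ≤ f → pvMemoOK cs cmb memo →
      (solveMemo cs cmb f i' e' memo).1 = pvG cs cmb i' e' ∧
        pvMemoOK cs cmb (solveMemo cs cmb f i' e' memo).2) :
    ∀ ts : List Nat, (∀ t ∈ ts, t < (e - i) / 2) →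
      ∀ (total : Int) (memo : PySem.Dict (Nat × Nat) Int), pvMemoOK cs cmb memo →
      ((ts.foldl (fun (p : Int × PySem.Dict (Nat × Nat) Int) t =>
          let k := i + 1 + 2 * t
          if cs.getD k ' ' = cs.getD i ' ' then
            let l := solveMemo cs cmb f (i + 1) k p.2
            let r := solveMemo cs cmb f (k + 1) e l.2
            ((p.1 + l.1 * r.1 % pvM * cmb ((e - i) / 2 - 1) ((k - i - 1) / 2)) % pvM,
              r.2)
          else p) (total, memo)).1 = ts.foldl (pvStepG2 cs cmb i e) total ∧
        pvMemoOK cs cmb (ts.foldl (fun (p : Int × PySem.Dict (Nat × Nat) Int) t =>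
          let k := i + 1 + 2 * t
          if cs.getD k ' ' = cs.getD i ' ' then
            let l := solveMemo cs cmb f (i + 1) k p.2
            let r := solveMemo cs cmb f (k + 1) e l.2
            ((p.1 + l.1 * r.1 % pvM * cmb ((e - i) / 2 - 1) ((k - i - 1) / 2)) % pvM,
              r.2)
          else p) (total, memo)).2) := by
  intro ts
  induction ts with
  | nil => intro _ total memo hm; exact ⟨rfl, hm⟩
  | cons t ts ih =>
    intro hts total memo hm
    have ht : t < (e - i) / 2 := hts t (List.mem_cons_self ..)
    have hts' : ∀ u ∈ ts, u < (e - i) / 2 := fun u hu => hts u (List.mem_cons_of_mem _ hu)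
    simp only [List.foldl_cons]
    by_cases hc : cs.getD (i + 1 + 2 * t) ' ' = cs.getD i ' '
    · simp only [if_pos hc]
      obtain ⟨hl1, hl2⟩ := IH (i + 1) (i + 1 + 2 * t) memo (by omega) hm
      obtain ⟨hr1, hr2⟩ := IH (i + 1 + 2 * t + 1) e _ (by omega) hl2
      have htot : (total + (solveMemo cs cmb f (i + 1) (i + 1 + 2 * t) memo).1 *
            (solveMemo cs cmb f (i + 1 + 2 * t + 1) e
              (solveMemo cs cmb f (i + 1) (i + 1 + 2 * t) memo).2).1 % pvM *
            cmb ((e - i) / 2 - 1) ((i + 1 + 2 * t - i - 1) / 2)) % pvM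
          = pvStepG2 cs cmb i e total t := by
        unfold pvStepG2
        simp only [if_pos hc, hl1, hr1]
      rw [← htot]
      exact ih hts' _ _ hr2
    · simp only [if_neg hc]
      have hstep : pvStepG2 cs cmb i e total t = total := by
        unfold pvStepG2; simp only [if_neg hc]
      rw [hstep]
      exact ih hts' _ _ hm

lemma solveMemo_correct (cs : List Char) (cmb : Nat → Nat → Int) :
    ∀ fuel i e memo, e - i ≤ fuel → pvMemoOK cs cmb memo →
      (solveMemo cs cmb fuel i e memo).1 = pvG cs cmb i e ∧
        pvMemoOK cs cmb (solveMemo cs cmb fuel i e memo).2 := by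
  intro fuel
  induction fuel with
  | zero =>
    intro i e memo hf hm
    have he : e ≤ i := by omega
    rw [solveMemo]
    simp only [if_pos he]
    exact ⟨(pvG_base cs cmb i e he).symm, hm⟩
  | succ f IH =>
    intro i e memo hf hm
    by_cases he : e ≤ i
    · rw [solveMemo]
      simp only [if_pos he]
      exact ⟨(pvG_base cs cmb i e he).symm, hm⟩
    · rw [solveMemo]
      simp only [if_neg he]
      cases hget : memo.get? (i, e) with
      | some v =>
        simp only [hget]
        exact ⟨hm i e v hget, hm⟩
      | none =>
        simp only [hget]
        have hfold := innerB cs cmb f i e (by omega) hf IH (List.range ((e - i) / 2))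
          (fun t htm => List.mem_range.mp htm) 0 memo hm
        refine ⟨?_, memoOK_insert cs cmb _ i e hfold.2 ?_⟩ <;>
        · simp only [hfold.1, stepG2_eq_stepG, ← pvG_step cs cmb i e he]

lemma memoOK_empty (cs : List Char) (cmb : Nat → Nat → Int) : pvMemoOK cs cmb PySem.Dict.empty := by
  intro i e v h
  simp [PySem.Dict.get?_empty] at h

-- ===== VERDICT (by name: the statement is the Claim_ definition above) =====
theorem solve_1080_py_spec : Claim_equal_solve_1080_py := by
  intro input_data hdom hpre
  unfold Spec_solve_1080_py solve_1080_py solve_1080_py_alt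
  have hpre' : (PySem.Str.strip input_data).toList ≠ [] := hpre
  set cs := (PySem.Str.strip input_data).toList with hcs
  by_cases hodd : cs.length % 2 = 1
  · simp [hodd]
  · simp only [if_neg hodd]
    have hev : cs.length % 2 = 0 := by omega
    rw [A_final cs _ hev hpre',
      (solveMemo_correct cs _ (cs.length + 1) 0 cs.length PySem.Dict.empty
        (by omega) (memoOK_empty cs _)).1]

-- the optional crash-fix claim (A raises IndexError where B returns "1")
@[simp] theorem solve_1080_py_raises : Claim_raises_solve_1080_py := by
  unfold Claim_raises_solve_1080_py
  exact ⟨fun s _ hr hp => hp hr, by decide⟩
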